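-- pv_equiv track=rewrite | github.com/imseongwoo/Algorithm | 삼성 기출/미생물연구.py | calculate_score_with_bfs
-- ===== SOURCE A (Python) =====
-- from collections import deque
-- from collections import defaultdict
--
-- def calculate_score_with_bfs(arr, N):
--     visited = [[False]*N for _ in range(N)]
--     dx = [-1, 1, 0, 0]
--     dy = [0, 0, -1, 1]
--
--     component_sizes = defaultdict(int)  # 각 미생물 ID의 전체 넓이
--     adjacent_pairs = set()              # 인접한 미생물 ID 쌍
--
--     for r in range(N):
--         for c in range(N):
--             if arr[r][c] != 0 and not visited[r][c]:
--                 q = deque()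
--                 q.append((r, c))
--                 visited[r][c] = True
--                 curr_id = arr[r][c]
--                 size = 1  # 이 연결 컴포넌트의 넓이
--
--                 while q:
--                     x, y = q.popleft()
--                     for i in range(4):
--                         nx, ny = x + dx[i], y + dy[i]
--                         if 0 <= nx < N and 0 <= ny < N:
--                             if not visited[nx][ny] and arr[nx][ny] == curr_id:
--                                 visited[nx][ny] = True
--                                 q.append((nx, ny))
--                                 size += 1
--                             elif arr[nx][ny] != 0 and arr[nx][ny] != curr_id:
--                                 a, b = sorted((curr_id, arr[nx][ny]))
--                                 adjacent_pairs.add((a, b))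
--
--                 component_sizes[curr_id] += size
--
--     # 인접한 쌍의 넓이 곱 점수 계산
--     score = 0
--     for a, b in adjacent_pairs:
--         score += component_sizes[a] * component_sizes[b]
--
--     return score
-- ===== SOURCE B (Python) =====
-- def calculate_score_with_bfs(arr, N):
--     # Same score, no flood fill: per-ID cell counts + the set of adjacent distinct
--     # nonzero ID pairs, found by scanning only right/down neighbors in one pass.
--     counts = {}
--     pairs = set()
--     for r in range(N):
--         for c in range(N):
--             v = arr[r][c]
--             if v != 0:
--                 counts[v] = counts.get(v, 0) + 1
--             if c + 1 < N:
--                 w = arr[r][c + 1]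
--                 if v != 0 and w != 0 and v != w:
--                     pairs.add((min(v, w), max(v, w)))
--             if r + 1 < N:
--                 w = arr[r + 1][c]
--                 if v != 0 and w != 0 and v != w:
--                     pairs.add((min(v, w), max(v, w)))
--     return sum(counts[a] * counts[b] for a, b in pairs)
-- ===== Notes on version B (the rewrite author's own statement) =====
-- stated objective: simpler
-- what changed: Replaces the BFS flood fill with visited matrix and deque by a single pass that counts cells per nonzero ID and collects the set of sorted adjacent distinct-ID pairs from right/down neighbors only, then sums the count products.
import Mathlib
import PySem

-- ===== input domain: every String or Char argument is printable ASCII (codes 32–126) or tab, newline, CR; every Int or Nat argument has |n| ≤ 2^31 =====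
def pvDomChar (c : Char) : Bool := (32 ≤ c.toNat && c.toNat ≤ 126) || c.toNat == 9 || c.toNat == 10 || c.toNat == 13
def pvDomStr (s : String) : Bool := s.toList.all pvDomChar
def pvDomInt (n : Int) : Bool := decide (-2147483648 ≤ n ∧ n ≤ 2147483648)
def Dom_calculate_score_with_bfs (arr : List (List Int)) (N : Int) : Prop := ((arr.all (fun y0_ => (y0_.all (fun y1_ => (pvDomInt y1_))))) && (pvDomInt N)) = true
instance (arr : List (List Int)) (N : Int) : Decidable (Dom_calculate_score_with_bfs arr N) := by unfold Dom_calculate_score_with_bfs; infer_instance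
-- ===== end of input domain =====

-- B replaces A's BFS flood fill (visited matrix + deque) by one pass that counts
-- cells per nonzero ID and collects sorted adjacent distinct-ID pairs from
-- right/down neighbors; objective: simpler.

-- ===== PORT A =====

-- arr[x][y]; every access both ports make is in range under Pre_ (and guarded by
-- 0 ≤ · < N in the BFS), so the defaults are never reached there.
def cell (arr : List (List Int)) (x y : Int) : Int :=
  PySem.List.pyGetD (PySem.List.pyGetD arr x []) y 0

-- visited[x][y]; only called with 0 ≤ x, y < N on an N×N matrix, so the
-- out-of-range default (true) is never reached.
def vget (v : List (List Bool)) (x y : Int) : Bool :=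
  (v.getD x.toNat []).getD y.toNat true

-- visited[x][y] = True (same in-range discipline)
def vset (v : List (List Bool)) (x y : Int) : List (List Bool) :=
  v.modify x.toNat (fun row => row.set y.toNat true)

-- a, b = sorted((a, b)) for a two-element tuple
def spair (a b : Int) : Int × Int := if a ≤ b then (a, b) else (b, a)

def dxl : List Int := [-1, 1, 0, 0]
def dyl : List Int := [0, 0, -1, 1]

structure BfsSt where
  visited : List (List Bool)
  q : List (Int × Int)
  size : Int
  pairs : PySem.Set (Int × Int)

-- body of `for i in range(4): …` for the popped cell (x, y)
def dirStep (arr : List (List Int)) (N curr x y : Int) (s : BfsSt) (i : Nat) : BfsSt :=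
  let nx := x + dxl.getD i 0
  let ny := y + dyl.getD i 0
  if 0 ≤ nx ∧ nx < N ∧ 0 ≤ ny ∧ ny < N then
    if vget s.visited nx ny = false ∧ cell arr nx ny = curr then
      { s with visited := vset s.visited nx ny, q := s.q ++ [(nx, ny)], size := s.size + 1 }
    else if cell arr nx ny ≠ 0 ∧ cell arr nx ny ≠ curr then
      { s with pairs := PySem.Set.add s.pairs (spair curr (cell arr nx ny)) }
    else s
  else s

-- number of False entries of visited (termination measure only)
def cfN (v : List (List Bool)) : Nat := (v.map (fun row => row.count false)).sum

lemma row_set_count (row : List Bool) (j : Nat) (h : row.getD j true = false) :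
    (row.set j true).count false + 1 = row.count false := by
  induction row generalizing j with
  | nil => simp at h
  | cons b t ih =>
    cases j with
    | zero => simp at h; subst h; simp
    | succ j =>
      simp only [List.getD] at h
      have := ih j (by simpa using h)
      simp only [List.set, List.count_cons]
      omega

lemma cfN_modify (v : List (List Bool)) (i j : Nat) (h : (v.getD i []).getD j true = false) :
    cfN (v.modify i (fun row => row.set j true)) + 1 = cfN v := by
  induction v generalizing i with
  | nil => simp at h
  | cons r t ih =>
    cases i with
    | zero =>
      simp only [List.getD, List.getElem?_cons_zero, Option.getD_some] at h
      rw [List.modify_zero_cons]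
      simp only [cfN, List.map, List.sum_cons]
      have := row_set_count r j h
      omega
    | succ m =>
      simp only [List.getD, List.getElem?_cons_succ] at h
      rw [List.modify_succ_cons]
      have := ih m h
      simp only [cfN, List.map, List.sum_cons]
      simp only [cfN] at this
      omega

lemma cfN_vset (v : List (List Bool)) (x y : Int) (h : vget v x y = false) :
    cfN (vset v x y) + 1 = cfN v := by
  unfold vget at h
  exact cfN_modify v x.toNat y.toNat h

def bfsMeasure (s : BfsSt) : Nat := 2 * cfN s.visited + s.q.length

lemma dirStep_measure (arr : List (List Int)) (N curr x y : Int) (s : BfsSt) (i : Nat) :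
    bfsMeasure (dirStep arr N curr x y s i) ≤ bfsMeasure s := by
  simp only [dirStep, bfsMeasure]
  split
  · split
    · rename_i hg hv
      have := cfN_vset s.visited _ _ hv.1
      simp only [List.length_append, List.length_singleton]
      omega
    · split <;> simp
  · simp

lemma foldl_measure_le {σ ι : Type} (m : σ → Nat) (f : σ → ι → σ) (l : List ι)
    (h : ∀ s i, m (f s i) ≤ m s) : ∀ s, m (l.foldl f s) ≤ m s := by
  induction l with
  | nil => simp
  | cons a t ih => intro s; exact le_trans (ih (f s a)) (h s a)

-- the `while q:` loop
def bfsLoop (arr : List (List Int)) (N curr : Int) (s : BfsSt) : BfsSt :=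
  match hq : s.q with
  | [] => s
  | (x, y) :: rest =>
    bfsLoop arr N curr ((List.range 4).foldl (dirStep arr N curr x y) { s with q := rest })
termination_by bfsMeasure s
decreasing_by
  have h1 := foldl_measure_le bfsMeasure (dirStep arr N curr x y)
      (List.range 4) (dirStep_measure arr N curr x y) { s with q := rest }
  simp only [bfsMeasure] at h1 ⊢
  rw [hq]
  simp only [List.length_cons]
  omega

structure OutSt where
  visited : List (List Bool)
  cs : PySem.Dict Int Int
  pairs : PySem.Set (Int × Int)

-- body of the double scan: one (r, c)
def visitCell (arr : List (List Int)) (N : Int) (st : OutSt) (r c : Int) : OutSt :=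
  if cell arr r c ≠ 0 ∧ vget st.visited r c = false then
    let curr := cell arr r c
    let s := bfsLoop arr N curr ⟨vset st.visited r c, [(r, c)], 1, st.pairs⟩
    { visited := s.visited, cs := st.cs.modify curr 0 (· + s.size), pairs := s.pairs }
  else st

-- the final `for a, b in adjacent_pairs` sum: the Python iterates the set in hash
-- order; the sum does not depend on the order, the port iterates insertion order.
def calculate_score_with_bfs (arr : List (List Int)) (N : Int) : Int :=
  let st := (PySem.List.pyRange 0 N 1).foldl (fun st r =>
      (PySem.List.pyRange 0 N 1).foldl (fun st c => visitCell arr N st r c) st)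
    ⟨List.replicate N.toNat (List.replicate N.toNat false), PySem.Dict.empty, PySem.Set.empty⟩
  st.pairs.foldl (fun score p => score + st.cs.getD p.1 0 * st.cs.getD p.2 0) 0

-- ===== PORT B =====

-- if v != 0 and w != 0 and v != w: pairs.add((min(v, w), max(v, w)))
def bUpd (v w : Int) (P : PySem.Set (Int × Int)) : PySem.Set (Int × Int) :=
  if v ≠ 0 ∧ w ≠ 0 ∧ v ≠ w then PySem.Set.add P (min v w, max v w) else P

-- loop body of B: one (r, c)
def bCell (arr : List (List Int)) (N : Int)
    (st : PySem.Dict Int Int × PySem.Set (Int × Int)) (r c : Int) :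
    PySem.Dict Int Int × PySem.Set (Int × Int) :=
  let v := cell arr r c
  let cnts := if v ≠ 0 then st.1.insert v (st.1.getD v 0 + 1) else st.1
  let p1 := if c + 1 < N then bUpd v (cell arr r (c + 1)) st.2 else st.2
  let p2 := if r + 1 < N then bUpd v (cell arr (r + 1) c) p1 else p1
  (cnts, p2)

-- final `sum(counts[a] * counts[b] for a, b in pairs)`: order-independent sum
def calculate_score_with_bfs_alt (arr : List (List Int)) (N : Int) : Int :=
  let st := (PySem.List.pyRange 0 N 1).foldl (fun st r =>
      (PySem.List.pyRange 0 N 1).foldl (fun st c => bCell arr N st r c) st)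
    (PySem.Dict.empty, PySem.Set.empty)
  st.2.foldl (fun score p => score + st.1.getD p.1 0 * st.1.getD p.2 0) 0

-- ===== PRECONDITION & SPEC =====
-- Pre_ = exactly the inputs where A returns: the first N rows exist and have at
-- least N columns (otherwise arr[r][c] raises IndexError); any N ≤ 0 is fine.
def Pre_calculate_score_with_bfs (arr : List (List Int)) (N : Int) : Prop :=
  N ≤ (arr.length : Int) ∧ ∀ row ∈ arr.take N.toNat, N ≤ (row.length : Int)
instance (arr : List (List Int)) (N : Int) : Decidable (Pre_calculate_score_with_bfs arr N) := by
  unfold Pre_calculate_score_with_bfs; infer_instance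

def pvWitness_calculate_score_with_bfs : List (List Int) × Int := ([[1, 2], [0, 2]], 2)

def Spec_calculate_score_with_bfs (arr : List (List Int)) (N : Int) (out : Int) : Prop := out = calculate_score_with_bfs_alt arr N
instance (arr : List (List Int)) (N : Int) (out : Int) : Decidable (Spec_calculate_score_with_bfs arr N out) := by unfold Spec_calculate_score_with_bfs; infer_instance

-- ===== CLAIM (what is proved, stated in full; the proofs are below) =====
def Claim_equal_calculate_score_with_bfs : Prop := ∀ (arr : List (List Int)) (N : Int), Dom_calculate_score_with_bfs arr N → Pre_calculate_score_with_bfs arr N → Spec_calculate_score_with_bfs arr N (calculate_score_with_bfs arr N)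

-- ===== LEMMAS AND PROOFS =====

-- ---- proof-side vocabulary ----

def Dims (N : Int) (v : List (List Bool)) : Prop :=
  v.length = N.toNat ∧ ∀ i < v.length, (v.getD i []).length = N.toNat

def Inb (N x y : Int) : Prop := 0 ≤ x ∧ x < N ∧ 0 ≤ y ∧ y < N

def dirList : List (Int × Int) := [(-1, 0), (1, 0), (0, -1), (0, 1)]

-- the pairs both programs may ever hold: sorted pairs of distinct nonzero values
-- of two 4-adjacent in-range cells
def Het (arr : List (List Int)) (N : Int) (p : Int × Int) : Prop :=
  ∃ x y d, d ∈ dirList ∧ Inb N x y ∧ Inb N (x + d.1) (y + d.2) ∧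
    cell arr x y ≠ 0 ∧ cell arr (x + d.1) (y + d.2) ≠ 0 ∧
    cell arr (x + d.1) (y + d.2) ≠ cell arr x y ∧
    p = spair (cell arr x y) (cell arr (x + d.1) (y + d.2))

def grid (N : Int) : Finset (ℕ × ℕ) := Finset.range N.toNat ×ˢ Finset.range N.toNat

def vtn (v : List (List Bool)) (z : ℕ × ℕ) : Bool := (v.getD z.1 []).getD z.2 true

def celln (arr : List (List Int)) (z : ℕ × ℕ) : Int := cell arr (z.1 : Int) (z.2 : Int)

def vcnt (arr : List (List Int)) (N : Int) (v : List (List Bool)) (a : Int) : ℕ :=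
  ∑ z ∈ grid N, (if vtn v z = true ∧ celln arr z = a then 1 else 0)

def fcnt (N : Int) (v : List (List Bool)) : ℕ :=
  ∑ z ∈ grid N, (if vtn v z = true then 0 else 1)

def gcount (arr : List (List Int)) (N a : Int) : ℕ :=
  ∑ z ∈ grid N, (if celln arr z = a then 1 else 0)

-- ---- vget / vset / counting infrastructure ----

lemma vget_eq_vtn (v : List (List Bool)) (x y : Int) :
    vget v x y = vtn v (x.toNat, y.toNat) := rfl

lemma mem_grid (N : Int) (z : ℕ × ℕ) : z ∈ grid N ↔ z.1 < N.toNat ∧ z.2 < N.toNat := by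
  simp [grid, Finset.mem_product]

lemma getD_set_true (row : List Bool) (j k : Nat) :
    (row.set j true).getD k true = if k = j then true else row.getD k true := by
  simp only [List.getD, List.getElem?_set]
  by_cases h : j = k
  · subst h
    rw [if_pos rfl]
    split <;> simp
  · rw [if_neg h, if_neg (fun hh => h hh.symm)]

lemma vtn_vset (v : List (List Bool)) (x y : Int) (z : ℕ × ℕ) :
    vtn (vset v x y) z = if z = (x.toNat, y.toNat) then true else vtn v z := by
  obtain ⟨i, j⟩ := z
  simp only [vtn, vset, List.getD, List.getElem?_modify]
  by_cases hi : x.toNat = i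
  · subst hi
    cases hrow : v[x.toNat]? with
    | none => simp [Prod.ext_iff]
    | some row =>
      simp only [Option.map_eq_map, Option.map_some, Option.getD_some]
      simp only [if_true]
      have := getD_set_true row y.toNat j
      simp only [List.getD] at this
      rw [this]
      by_cases hj : j = y.toNat <;> simp [hj, Prod.ext_iff]
  · simp only [Option.map_eq_map, if_neg hi]
    have : ¬ ((i, j) = (x.toNat, y.toNat)) := by simp [Prod.ext_iff]; intro h; omega
    rw [if_neg this]
    cases v[i]? <;> simp

lemma vget_vset_mono (v : List (List Bool)) (x y a b : Int)
    (h : vget v a b = true) : vget (vset v x y) a b = true := by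
  rw [vget_eq_vtn] at h ⊢
  rw [vtn_vset]
  split <;> simp [h]

lemma dims_vset (N : Int) (v : List (List Bool)) (x y : Int) (h : Dims N v) :
    Dims N (vset v x y) := by
  obtain ⟨h1, h2⟩ := h
  refine ⟨by simpa [vset, List.length_modify] using h1, ?_⟩
  intro i hi
  simp only [vset, List.length_modify] at hi
  have := h2 i hi
  simp only [vset, List.getD, List.getElem?_modify]
  cases hrow : v[i]? with
  | none =>
    rw [List.getElem?_eq_none_iff] at hrow
    omega
  | some row =>
    simp only [List.getD, hrow, Option.getD_some] at this
    by_cases hx : x.toNat = i <;> simp [hx, List.length_set, this]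

lemma count_false_eq (row : List Bool) :
    row.count false = ∑ j ∈ Finset.range row.length, (if row.getD j true then 0 else 1) := by
  induction row with
  | nil => simp
  | cons b t ih =>
    rw [List.length_cons, Finset.sum_range_succ']
    simp only [List.getD_cons_succ, List.getD_cons_zero]
    rw [List.count_cons, ← ih]
    cases b <;> simp

lemma cfN_eq (v : List (List Bool)) :
    cfN v = ∑ i ∈ Finset.range v.length, (v.getD i []).count false := by
  induction v with
  | nil => simp [cfN]
  | cons r t ih =>
    rw [List.length_cons, Finset.sum_range_succ']
    simp only [List.getD_cons_succ, List.getD_cons_zero]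
    rw [← ih]
    simp [cfN, Nat.add_comm]

lemma fcnt_eq_cfN (N : Int) (v : List (List Bool)) (h : Dims N v) : fcnt N v = cfN v := by
  obtain ⟨h1, h2⟩ := h
  rw [cfN_eq, fcnt, grid, Finset.sum_product, h1]
  refine Finset.sum_congr rfl ?_
  intro i hi
  rw [Finset.mem_range] at hi
  rw [count_false_eq, h2 i (by omega)]
  exact Finset.sum_congr rfl fun j _ => by
    cases hb : (v.getD i []).getD j true <;>
      simp only [List.getD] at hb <;> simp [vtn, List.getD, hb]

-- visited grew, every new cell has value `curr`: per-value counts move with the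
-- false-count
lemma vcnt_fcnt_const (arr : List (List Int)) (N : Int) (v v' : List (List Bool)) (curr : Int)
    (hm : ∀ z ∈ grid N, vtn v z = true → vtn v' z = true)
    (hnv : ∀ z ∈ grid N, vtn v' z = true → vtn v z = true ∨ celln arr z = curr) :
    vcnt arr N v' curr + fcnt N v' = vcnt arr N v curr + fcnt N v ∧
    ∀ a, a ≠ curr → vcnt arr N v' a = vcnt arr N v a := by
  constructor
  · rw [vcnt, fcnt, vcnt, fcnt, ← Finset.sum_add_distrib, ← Finset.sum_add_distrib]
    refine Finset.sum_congr rfl ?_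
    intro z hz
    have hm' := hm z hz
    have hnv' := hnv z hz
    cases hv : vtn v z <;> cases hv' : vtn v' z
    · simp [hv, hv']
    · have hc : celln arr z = curr := by
        rcases hnv' hv' with h | h
        · rw [hv] at h; cases h
        · exact h
      simp [hv, hv', hc]
    · rw [hm' hv] at hv'; cases hv'
    · simp [hv, hv']
  · intro a ha
    rw [vcnt, vcnt]
    refine Finset.sum_congr rfl ?_
    intro z hz
    have hm' := hm z hz
    have hnv' := hnv z hz
    cases hv : vtn v z <;> cases hv' : vtn v' z
    · simp [hv, hv']
    · have hc : celln arr z = curr := by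
        rcases hnv' hv' with h | h
        · rw [hv] at h; cases h
        · exact h
      simp only [hv, hv', hc]
      simp [Ne.symm ha]
    · rw [hm' hv] at hv'; cases hv'
    · simp [hv, hv']

lemma spair_min_max (a b : Int) : spair a b = (min a b, max a b) := by
  unfold spair
  split <;> rename_i h
  · simp [min_def, max_def, h]
  · have h2 : b ≤ a := by omega
    have h3 : ¬ (a ≤ b) := h
    simp [min_def, max_def, h2, h3]

lemma het_ne_zero (arr : List (List Int)) (N : Int) (p : Int × Int) (h : Het arr N p) :
    p.1 ≠ 0 ∧ p.2 ≠ 0 := by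
  obtain ⟨x, y, d, _, _, _, h1, h2, _, hp⟩ := h
  subst hp
  unfold spair
  split
  · exact ⟨h1, h2⟩
  · exact ⟨h2, h1⟩

-- ---- the BFS invariant ----

structure BfsInv (arr : List (List Int)) (N curr : Int) (v₀ w : List (List Bool))
    (P0 : PySem.Set (Int × Int)) (E : Int × Int → Prop) (s : BfsSt) : Prop where
  dims : Dims N s.visited
  mono0 : ∀ x y : Int, vget v₀ x y = true → vget w x y = true
  monow : ∀ x y : Int, vget w x y = true → vget s.visited x y = true
  newval : ∀ x y : Int, Inb N x y → vget s.visited x y = true →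
    vget v₀ x y = true ∨ cell arr x y = curr
  qmem : ∀ z ∈ s.q, Inb N z.1 z.2 ∧ vget s.visited z.1 z.2 = true ∧
    vget v₀ z.1 z.2 = false ∧ cell arr z.1 z.2 = curr
  qnd : s.q.Nodup
  siz : s.size + (cfN s.visited : Int) = (cfN v₀ : Int)
  psub : ∀ p ∈ s.pairs, p ∈ P0 ∨ Het arr N p
  pmono : ∀ p ∈ P0, p ∈ s.pairs
  pnd : s.pairs.Nodup
  pdone : ∀ x y : Int, Inb N x y → vget s.visited x y = true → vget v₀ x y = false →
    (x, y) ∉ s.q → ¬ E (x, y) → ∀ d ∈ dirList, Inb N (x + d.1) (y + d.2) →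
    cell arr (x + d.1) (y + d.2) ≠ 0 → cell arr (x + d.1) (y + d.2) ≠ cell arr x y →
    spair (cell arr x y) (cell arr (x + d.1) (y + d.2)) ∈ s.pairs

-- one direction of the `for i in range(4)` body preserves the invariant
lemma dirStep_inv (arr : List (List Int)) (N curr x y : Int) (v₀ w : List (List Bool))
    (P0 : PySem.Set (Int × Int)) (i : Nat) (hi : i < 4) (s : BfsSt) (hc : curr ≠ 0)
    (hinv : BfsInv arr N curr v₀ w P0 (· = (x, y)) s)
    (hsrc : Inb N x y ∧ cell arr x y = curr ∧ vget s.visited x y = true)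
    (hnq : (x, y) ∉ s.q) :
    BfsInv arr N curr v₀ w P0 (· = (x, y)) (dirStep arr N curr x y s i) ∧
    (∀ p ∈ s.pairs, p ∈ (dirStep arr N curr x y s i).pairs) ∧
    (∀ a b : Int, vget s.visited a b = true → vget (dirStep arr N curr x y s i).visited a b = true) ∧
    ((x, y) ∉ (dirStep arr N curr x y s i).q) ∧
    (Inb N (x + dxl.getD i 0) (y + dyl.getD i 0) →
      cell arr (x + dxl.getD i 0) (y + dyl.getD i 0) ≠ 0 →
      cell arr (x + dxl.getD i 0) (y + dyl.getD i 0) ≠ curr →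
      spair curr (cell arr (x + dxl.getD i 0) (y + dyl.getD i 0)) ∈
        (dirStep arr N curr x y s i).pairs) := by
  obtain ⟨dx, dy, hgx, hgy, hd⟩ :
      ∃ dx dy, dxl.getD i 0 = dx ∧ dyl.getD i 0 = dy ∧ (dx, dy) ∈ dirList :=
    ⟨_, _, rfl, rfl, by interval_cases i <;> decide⟩
  simp only [dirStep, hgx, hgy]
  by_cases hg : 0 ≤ x + dx ∧ x + dx < N ∧ 0 ≤ y + dy ∧ y + dy < N
  · rw [if_pos hg]
    by_cases hb1 : vget s.visited (x + dx) (y + dy) = false ∧ cell arr (x + dx) (y + dy) = curr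
    · rw [if_pos hb1]
      have hnqq : (x + dx, y + dy) ∉ s.q := fun hmem => by
        have := (hinv.qmem _ hmem).2.1
        rw [this] at hb1
        cases hb1.1
      refine ⟨⟨dims_vset N _ _ _ hinv.dims, hinv.mono0,
          fun a b hab => vget_vset_mono _ _ _ _ _ (hinv.monow a b hab), ?_, ?_, ?_, ?_,
          hinv.psub, hinv.pmono, hinv.pnd, ?_⟩, fun p hp => hp,
          fun a b hab => vget_vset_mono _ _ _ _ _ hab, ?_, ?_⟩
      · -- newval
        intro a b hab hvt
        rw [vget_eq_vtn, vtn_vset] at hvt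
        split at hvt
        · rename_i he
          rw [Prod.mk.injEq] at he
          obtain ⟨ha1, ha2, ha3, ha4⟩ := hab
          have : a = x + dx ∧ b = y + dy := by omega
          right
          rw [this.1, this.2]
          exact hb1.2
        · exact hinv.newval a b hab hvt
      · -- qmem
        intro z hz
        rcases List.mem_append.mp hz with hz | hz
        · obtain ⟨z1, z2, z3, z4⟩ := hinv.qmem z hz
          exact ⟨z1, vget_vset_mono _ _ _ _ _ z2, z3, z4⟩
        · rw [List.mem_singleton] at hz
          subst hz
          refine ⟨hg, ?_, ?_, hb1.2⟩
          · rw [vget_eq_vtn, vtn_vset, if_pos rfl]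
          · cases hv0 : vget v₀ (x + dx) (y + dy) with
            | false => rfl
            | true =>
              rw [hinv.monow _ _ (hinv.mono0 _ _ hv0)] at hb1
              cases hb1.1
      · -- qnd
        rw [List.nodup_append]
        exact ⟨hinv.qnd, List.nodup_singleton _,
          fun a ha b hb => by rw [List.mem_singleton] at hb; subst hb; exact fun e => hnqq (e ▸ ha)⟩
      · -- siz
        have := cfN_vset s.visited (x + dx) (y + dy) hb1.1
        have hs := hinv.siz
        show s.size + 1 + (cfN (vset s.visited (x + dx) (y + dy)) : ℤ) = (cfN v₀ : ℤ)
        omega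
      · -- pdone
        intro a b hab hvt hv0 hq hE d hdm hnb hnz hne
        rw [vget_eq_vtn, vtn_vset] at hvt
        split at hvt
        · rename_i he
          rw [Prod.mk.injEq] at he
          obtain ⟨ha1, ha2, ha3, ha4⟩ := hab
          have hzz : a = x + dx ∧ b = y + dy := by omega
          exfalso
          exact hq (by rw [List.mem_append, List.mem_singleton, hzz.1, hzz.2]; right; rfl)
        · refine hinv.pdone a b hab hvt hv0 ?_ hE d hdm hnb hnz hne
          exact fun hmem => hq (List.mem_append.mpr (Or.inl hmem))
      · -- (x, y) not re-enqueued
        rw [List.mem_append, List.mem_singleton]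
        rintro (hmem | he)
        · exact hnq hmem
        · rw [Prod.mk.injEq] at he
          rw [← he.1, ← he.2, hsrc.2.2] at hb1
          cases hb1.1
      · -- the direction's pair: impossible, the neighbor has value curr
        intro _ _ hne
        exact absurd hb1.2 hne
    · rw [if_neg hb1]
      by_cases hb2 : cell arr (x + dx) (y + dy) ≠ 0 ∧ cell arr (x + dx) (y + dy) ≠ curr
      · rw [if_pos hb2]
        have hhet : Het arr N (spair curr (cell arr (x + dx) (y + dy))) := by
          refine ⟨x, y, (dx, dy), hd, hsrc.1, hg, ?_, hb2.1, ?_, ?_⟩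
          · rw [hsrc.2.1]; exact hc
          · rw [hsrc.2.1]; exact hb2.2
          · rw [hsrc.2.1]
        refine ⟨⟨hinv.dims, hinv.mono0, hinv.monow, hinv.newval, hinv.qmem, hinv.qnd, hinv.siz,
            ?_, ?_, PySem.Set.nodup_add _ _ hinv.pnd, ?_⟩,
            ?_, fun a b hab => hab, hnq, ?_⟩
        · -- psub
          intro p hp
          rcases (PySem.Set.mem_add _ _ _).mp hp with hp | hp
          · exact hinv.psub p hp
          · right; rw [hp]; exact hhet
        · -- pmono
          intro p hp
          exact (PySem.Set.mem_add _ _ _).mpr (Or.inl (hinv.pmono p hp))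
        · -- pdone
          intro a b hab hvt hv0 hq hE d hdm hnb hnz hne
          exact (PySem.Set.mem_add _ _ _).mpr
            (Or.inl (hinv.pdone a b hab hvt hv0 hq hE d hdm hnb hnz hne))
        · -- pairs grow
          intro p hp
          exact (PySem.Set.mem_add _ _ _).mpr (Or.inl hp)
        · -- the direction's pair is now present
          intro _ _ _
          rw [← hsrc.2.1]
          exact (PySem.Set.mem_add _ _ _).mpr (Or.inr rfl)
      · rw [if_neg hb2]
        refine ⟨hinv, fun p hp => hp, fun a b hab => hab, hnq, ?_⟩
        intro _ hnz hne
        exact absurd ⟨hnz, hne⟩ hb2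
  · rw [if_neg hg]
    refine ⟨hinv, fun p hp => hp, fun a b hab => hab, hnq, ?_⟩
    intro hnb _ _
    exact absurd hnb hg

-- the whole `while q:` loop
lemma bfsLoop_inv (arr : List (List Int)) (N curr : Int) (v₀ w : List (List Bool))
    (P0 : PySem.Set (Int × Int)) (hc : curr ≠ 0) (s : BfsSt)
    (hinv : BfsInv arr N curr v₀ w P0 (fun _ => False) s) :
    BfsInv arr N curr v₀ w P0 (fun _ => False) (bfsLoop arr N curr s) ∧
    (bfsLoop arr N curr s).q = [] := by
  induction s using bfsLoop.induct arr N curr with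
  | case1 s hq =>
    rw [bfsLoop.eq_def]
    split
    · exact ⟨hinv, by assumption⟩
    · rename_i x y rest heq
      rw [hq] at heq
      cases heq
  | case2 s x y rest hq ih =>
    rw [bfsLoop.eq_def]
    split
    · rename_i heq
      rw [hq] at heq
      cases heq
    · rename_i x' y' rest' heq
      rw [hq] at heq
      injection heq with h1 h2
      injection h1 with hx hy
      subst hx; subst hy; subst h2
      obtain ⟨hin, hvt, hv0, hcell⟩ := hinv.qmem (x, y) (by rw [hq]; exact List.mem_cons_self)
      have hqnd := hinv.qnd
      rw [hq] at hqnd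
      have hnr : (x, y) ∉ rest := (List.nodup_cons.mp hqnd).1
      have hrestnd : rest.Nodup := (List.nodup_cons.mp hqnd).2
      have hinv1 : BfsInv arr N curr v₀ w P0 (· = (x, y))
          { visited := s.visited, q := rest, size := s.size, pairs := s.pairs } := by
        refine ⟨hinv.dims, hinv.mono0, hinv.monow, hinv.newval, ?_, hrestnd, hinv.siz,
          hinv.psub, hinv.pmono, hinv.pnd, ?_⟩
        · intro z hz
          exact hinv.qmem z (by rw [hq]; exact List.mem_cons_of_mem _ hz)
        · intro a b hab hvtab hv0ab hqab hE d hdm hnb hnz hne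
          refine hinv.pdone a b hab hvtab hv0ab ?_ not_false d hdm hnb hnz hne
          rw [hq]
          intro hmem
          rcases List.mem_cons.mp hmem with he | hm
          · exact hE he
          · exact hqab hm
      obtain ⟨hinv2, hpm1, hvm1, hnq1, hedge0⟩ :=
        dirStep_inv arr N curr x y v₀ w P0 0 (by omega) _ hc hinv1 ⟨hin, hcell, hvt⟩ hnr
      obtain ⟨hinv3, hpm2, hvm2, hnq2, hedge1⟩ :=
        dirStep_inv arr N curr x y v₀ w P0 1 (by omega) _ hc hinv2
          ⟨hin, hcell, hvm1 x y hvt⟩ hnq1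
      obtain ⟨hinv4, hpm3, hvm3, hnq3, hedge2⟩ :=
        dirStep_inv arr N curr x y v₀ w P0 2 (by omega) _ hc hinv3
          ⟨hin, hcell, hvm2 x y (hvm1 x y hvt)⟩ hnq2
      obtain ⟨hinv5, hpm4, hvm4, hnq4, hedge3⟩ :=
        dirStep_inv arr N curr x y v₀ w P0 3 (by omega) _ hc hinv4
          ⟨hin, hcell, hvm3 x y (hvm2 x y (hvm1 x y hvt))⟩ hnq3
      apply ih
      refine ⟨hinv5.dims, hinv5.mono0, hinv5.monow, hinv5.newval, hinv5.qmem, hinv5.qnd,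
        hinv5.siz, hinv5.psub, hinv5.pmono, hinv5.pnd, ?_⟩
      intro a b hab hvtab hv0ab hqab _ d hdm hnb hnz hne
      by_cases hexy : (a, b) = (x, y)
      · rw [Prod.mk.injEq] at hexy
        obtain ⟨hax, hby⟩ := hexy
        subst hax; subst hby
        rw [hcell] at hne
        simp only [dirList, List.mem_cons, List.not_mem_nil, or_false] at hdm
        rcases hdm with hdm | hdm | hdm | hdm <;> subst hdm
        · have h := hedge0 hnb hnz hne
          rw [hcell]
          exact hpm4 _ (hpm3 _ (hpm2 _ h))
        · have h := hedge1 hnb hnz hne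
          rw [hcell]
          exact hpm4 _ (hpm3 _ h)
        · have h := hedge2 hnb hnz hne
          rw [hcell]
          exact hpm4 _ h
        · have h := hedge3 hnb hnz hne
          rw [hcell]
          exact h
      · exact hinv5.pdone a b hab hvtab hv0ab hqab hexy d hdm hnb hnz hne

-- ---- the outer double scan (A) ----

structure OInv (arr : List (List Int)) (N : Int) (r c : Int) (st : OutSt) : Prop where
  dims : Dims N st.visited
  good : ∀ x y : Int, Inb N x y → vget st.visited x y = true → cell arr x y ≠ 0
  scanned : ∀ x y : Int, Inb N x y → cell arr x y ≠ 0 →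
    (x < r ∨ (x = r ∧ y < c)) → vget st.visited x y = true
  cs : ∀ a : Int, a ≠ 0 → st.cs.getD a 0 = (vcnt arr N st.visited a : Int)
  psub : ∀ p ∈ st.pairs, Het arr N p
  pfull : ∀ x y : Int, Inb N x y → vget st.visited x y = true →
    ∀ d ∈ dirList, Inb N (x + d.1) (y + d.2) → cell arr (x + d.1) (y + d.2) ≠ 0 →
    cell arr (x + d.1) (y + d.2) ≠ cell arr x y →
    spair (cell arr x y) (cell arr (x + d.1) (y + d.2)) ∈ st.pairs
  pnd : st.pairs.Nodup

lemma vget_vset_self (v : List (List Bool)) (x y : Int) : vget (vset v x y) x y = true := by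
  rw [vget_eq_vtn, vtn_vset, if_pos rfl]

lemma vget_natCast (v : List (List Bool)) (z : ℕ × ℕ) :
    vget v (z.1 : Int) (z.2 : Int) = vtn v z := by
  rw [vget_eq_vtn]
  simp

lemma inb_of_mem_grid (N : Int) (z : ℕ × ℕ) (hz : z ∈ grid N) :
    Inb N (z.1 : Int) (z.2 : Int) := by
  rw [mem_grid] at hz
  refine ⟨by omega, by omega, by omega, by omega⟩

lemma visitCell_inv (arr : List (List Int)) (N r c : Int) (st : OutSt)
    (hrc : Inb N r c) (h : OInv arr N r c st) :
    OInv arr N r (c + 1) (visitCell arr N st r c) := by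
  obtain ⟨b1, b2, b3, b4⟩ := hrc
  simp only [visitCell]
  by_cases hcase : cell arr r c ≠ 0 ∧ vget st.visited r c = false
  · rw [if_pos hcase]
    have hinv0 : BfsInv arr N (cell arr r c) st.visited (vset st.visited r c) st.pairs
        (fun _ => False) ⟨vset st.visited r c, [(r, c)], 1, st.pairs⟩ := by
      refine ⟨dims_vset N _ r c h.dims, fun a b hab => vget_vset_mono _ _ _ _ _ hab,
        fun a b hab => hab, ?_, ?_, List.nodup_singleton _, ?_, fun p hp => Or.inl hp,
        fun p hp => hp, h.pnd, ?_⟩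
      · intro a b hab hvt
        rw [vget_eq_vtn, vtn_vset] at hvt
        split at hvt
        · rename_i he
          rw [Prod.mk.injEq] at he
          obtain ⟨ha1, ha2, ha3, ha4⟩ := hab
          have : a = r ∧ b = c := by omega
          right
          rw [this.1, this.2]
        · exact Or.inl hvt
      · intro z hz
        rw [List.mem_singleton] at hz
        subst hz
        exact ⟨⟨b1, b2, b3, b4⟩, vget_vset_self _ _ _, hcase.2, rfl⟩
      · have := cfN_vset st.visited r c hcase.2
        show (1 : Int) + (cfN (vset st.visited r c) : Int) = (cfN st.visited : Int)
        omega
      · intro a b hab hvt hv0 hq _ d hdm hnb hnz hne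
        exfalso
        rw [vget_eq_vtn, vtn_vset] at hvt
        split at hvt
        · rename_i he
          rw [Prod.mk.injEq] at he
          obtain ⟨ha1, ha2, ha3, ha4⟩ := hab
          have hee : a = r ∧ b = c := by omega
          exact hq (by rw [List.mem_singleton, hee.1, hee.2])
        · rw [vget_eq_vtn] at hv0
          rw [hvt] at hv0
          cases hv0
    obtain ⟨hf, hqnil⟩ := bfsLoop_inv arr N (cell arr r c) st.visited (vset st.visited r c)
      st.pairs hcase.1 _ hinv0
    have hm0 : ∀ a b : Int, vget st.visited a b = true →
        vget (bfsLoop arr N (cell arr r c) ⟨vset st.visited r c, [(r, c)], 1, st.pairs⟩).visited a b = true :=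
      fun a b hab => hf.monow a b (hf.mono0 a b hab)
    have hw : vget (bfsLoop arr N (cell arr r c) ⟨vset st.visited r c, [(r, c)], 1, st.pairs⟩).visited r c = true :=
      hf.monow r c (vget_vset_self _ _ _)
    constructor
    · exact hf.dims
    · -- good
      intro a b hab hvt
      rcases hf.newval a b hab hvt with hv | hv
      · exact h.good a b hab hv
      · rw [hv]; exact hcase.1
    · -- scanned
      intro a b hab hcnz hlt
      by_cases hac : a = r ∧ b = c
      · rw [hac.1, hac.2]; exact hw
      · refine hm0 a b (h.scanned a b hab hcnz ?_)
        rcases Decidable.not_and_iff_or_not.mp hac with hh | hh <;> omega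
    · -- cs
      intro a ha
      show (st.cs.modify (cell arr r c) 0 (· + _)).getD a 0 = _
      rw [PySem.Dict.getD_modify]
      have hmg : ∀ z ∈ grid N, vtn st.visited z = true →
          vtn (bfsLoop arr N (cell arr r c) ⟨vset st.visited r c, [(r, c)], 1, st.pairs⟩).visited z = true := by
        intro z _ hz
        rw [← vget_natCast] at hz ⊢
        exact hm0 _ _ hz
      have hng : ∀ z ∈ grid N, vtn (bfsLoop arr N (cell arr r c) ⟨vset st.visited r c, [(r, c)], 1, st.pairs⟩).visited z = true →
          vtn st.visited z = true ∨ celln arr z = cell arr r c := by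
        intro z hzg hz
        rw [← vget_natCast] at hz ⊢
        exact hf.newval _ _ (inb_of_mem_grid N z hzg) hz
      obtain ⟨hcnt1, hcnt2⟩ := vcnt_fcnt_const arr N st.visited _ (cell arr r c) hmg hng
      rw [fcnt_eq_cfN N _ h.dims, fcnt_eq_cfN N _ hf.dims] at hcnt1
      have hsiz := hf.siz
      by_cases hac : a = cell arr r c
      · rw [if_pos hac, h.cs (cell arr r c) hcase.1, hac]
        show _ = (vcnt arr N (bfsLoop arr N (cell arr r c)
          ⟨vset st.visited r c, [(r, c)], 1, st.pairs⟩).visited (cell arr r c) : Int)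
        omega
      · rw [if_neg hac, h.cs a ha, hcnt2 a hac]
    · -- psub
      intro p hp
      rcases hf.psub p hp with hp' | hp'
      · exact h.psub p hp'
      · exact hp'
    · -- pfull
      intro a b hab hvt d hdm hnb hnz hne
      cases hv0 : vget st.visited a b with
      | true => exact hf.pmono _ (h.pfull a b hab hv0 d hdm hnb hnz hne)
      | false =>
        refine hf.pdone a b hab hvt hv0 ?_ not_false d hdm hnb hnz hne
        rw [hqnil]
        exact List.not_mem_nil
    · exact hf.pnd
  · rw [if_neg hcase]
    refine ⟨h.dims, h.good, ?_, h.cs, h.psub, h.pfull, h.pnd⟩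
    intro a b hab hcnz hlt
    by_cases hac : a = r ∧ b = c
    · rcases Decidable.not_and_iff_or_not.mp hcase with hh | hh
      · exact absurd (hac.1 ▸ hac.2 ▸ hcnz) (by simpa using hh)
      · rw [hac.1, hac.2]
        cases hvv : vget st.visited r c with
        | true => rfl
        | false => exact absurd hvv hh
    · refine h.scanned a b hab hcnz ?_
      rcases Decidable.not_and_iff_or_not.mp hac with hh | hh <;> omega

lemma oinv_row (arr : List (List Int)) (N r : Int) (st : OutSt)
    (h : OInv arr N r N st) : OInv arr N (r + 1) 0 st := by
  refine ⟨h.dims, h.good, ?_, h.cs, h.psub, h.pfull, h.pnd⟩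
  intro x y hinb hc hlt
  exact h.scanned x y hinb hc (by obtain ⟨_, _, _, h4⟩ := hinb; omega)

lemma oinv_init (arr : List (List Int)) (N : Int) :
    OInv arr N 0 0 ⟨List.replicate N.toNat (List.replicate N.toNat false),
      PySem.Dict.empty, PySem.Set.empty⟩ := by
  have hv : ∀ z : ℕ × ℕ, z ∈ grid N →
      vtn (List.replicate N.toNat (List.replicate N.toNat false)) z = false := by
    intro z hz
    rw [mem_grid] at hz
    simp [vtn, List.getD, List.getElem?_replicate, hz.1, hz.2]
  refine ⟨⟨by simp, ?_⟩, ?_, ?_, ?_, ?_, ?_, ?_⟩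
  · intro i hi
    simp only [List.length_replicate] at hi
    simp [List.getD, List.getElem?_replicate, hi]
  · intro x y hinb hvt
    exfalso
    obtain ⟨h1, h2, h3, h4⟩ := hinb
    rw [vget_eq_vtn] at hvt
    rw [hv (x.toNat, y.toNat) (by rw [mem_grid]; constructor <;> simp <;> omega)] at hvt
    cases hvt
  · intro x y hinb _ hlt
    exfalso
    obtain ⟨h1, h2, h3, h4⟩ := hinb
    omega
  · intro a _
    rw [PySem.Dict.getD_empty]
    have : vcnt arr N (List.replicate N.toNat (List.replicate N.toNat false)) a = 0 :=
      Finset.sum_eq_zero (fun z hz => by simp [hv z hz])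
    rw [this]
    rfl
  · intro p hp
    cases hp
  · intro x y hinb hvt
    exfalso
    obtain ⟨h1, h2, h3, h4⟩ := hinb
    rw [vget_eq_vtn] at hvt
    rw [hv (x.toNat, y.toNat) (by rw [mem_grid]; constructor <;> simp <;> omega)] at hvt
    cases hvt
  · exact List.nodup_nil

-- generic range-loop invariant rule
lemma foldl_pyRange_inv {σ : Type} (f : σ → Int → σ) (I : Int → σ → Prop) (a b : Int)
    (hab : a ≤ b) (hstep : ∀ c s, a ≤ c → c < b → I c s → I (c + 1) (f s c)) :
    ∀ s, I a s → I b ((PySem.List.pyRange a b 1).foldl f s) := by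
  have aux : ∀ (k : ℕ) (a' : Int) (s : σ), a ≤ a' → (k : Int) = b - a' → I a' s →
      I b ((PySem.List.pyRange a' b 1).foldl f s) := by
    intro k
    induction k with
    | zero =>
      intro a' s _ hk hs
      have hb : b = a' := by omega
      subst hb
      rw [PySem.List.pyRange_one_eq_nil (le_refl b)]
      exact hs
    | succ m ih =>
      intro a' s ha' hk hs
      have hlt : a' < b := by omega
      rw [PySem.List.pyRange_one_cons hlt, List.foldl_cons]
      exact ih (a' + 1) (f s a') (by omega) (by omega) (hstep a' s ha' hlt hs)
  intro s hs
  exact aux (b - a).toNat a s (le_refl a) (by omega) hs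

-- ---- the B scan ----

-- the pair contributed by B at source (x, y) (right / down neighbor)
def RdFrom (arr : List (List Int)) (N x y : Int) (p : Int × Int) : Prop :=
  (y + 1 < N ∧ cell arr x y ≠ 0 ∧ cell arr x (y + 1) ≠ 0 ∧ cell arr x y ≠ cell arr x (y + 1) ∧
    p = (min (cell arr x y) (cell arr x (y + 1)), max (cell arr x y) (cell arr x (y + 1)))) ∨
  (x + 1 < N ∧ cell arr x y ≠ 0 ∧ cell arr (x + 1) y ≠ 0 ∧ cell arr x y ≠ cell arr (x + 1) y ∧
    p = (min (cell arr x y) (cell arr (x + 1) y), max (cell arr x y) (cell arr (x + 1) y)))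

abbrev LexLt (x y r c : Int) : Prop := x < r ∨ (x = r ∧ y < c)

def psum (arr : List (List Int)) (N r c a : Int) : ℕ :=
  ∑ z ∈ grid N, (if LexLt (z.1 : Int) (z.2 : Int) r c ∧ celln arr z = a then 1 else 0)

structure BInv (arr : List (List Int)) (N : Int) (r c : Int)
    (st : PySem.Dict Int Int × PySem.Set (Int × Int)) : Prop where
  cnt : ∀ a : Int, a ≠ 0 → st.1.getD a 0 = (psum arr N r c a : Int)
  pmem : ∀ p : Int × Int, p ∈ st.2 ↔
    ∃ x y : Int, Inb N x y ∧ LexLt x y r c ∧ RdFrom arr N x y p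
  pnd : st.2.Nodup

lemma mem_bUpd (v w : Int) (P : PySem.Set (Int × Int)) (p : Int × Int) :
    p ∈ bUpd v w P ↔ p ∈ P ∨ (v ≠ 0 ∧ w ≠ 0 ∧ v ≠ w ∧ p = (min v w, max v w)) := by
  unfold bUpd
  split
  · rename_i hg
    rw [PySem.Set.mem_add]
    tauto
  · rename_i hg
    constructor
    · exact Or.inl
    · rintro (h | ⟨a1, a2, a3, _⟩)
      · exact h
      · exact absurd ⟨a1, a2, a3⟩ hg

lemma nodup_bUpd (v w : Int) (P : PySem.Set (Int × Int)) (h : P.Nodup) :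
    (bUpd v w P).Nodup := by
  unfold bUpd
  split
  · exact PySem.Set.nodup_add _ _ h
  · exact h

lemma psum_succ (arr : List (List Int)) (N r c a : Int) (hrc : Inb N r c) :
    psum arr N r (c + 1) a = psum arr N r c a + (if cell arr r c = a then 1 else 0) := by
  obtain ⟨h1, h2, h3, h4⟩ := hrc
  have hmem : ((r.toNat, c.toNat) : ℕ × ℕ) ∈ grid N := by rw [mem_grid]; constructor <;> simp <;> omega
  have hcp : celln arr (r.toNat, c.toNat) = cell arr r c := by
    simp only [celln, Int.toNat_of_nonneg h1, Int.toNat_of_nonneg h3]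
  have hsingle : (if cell arr r c = a then (1 : ℕ) else 0) =
      ∑ z ∈ grid N, if z = (r.toNat, c.toNat) then (if celln arr z = a then 1 else 0) else 0 := by
    rw [Finset.sum_ite_eq' (grid N) ((r.toNat, c.toNat) : ℕ × ℕ)
      (fun z => if celln arr z = a then 1 else 0), if_pos hmem, hcp]
  rw [hsingle, psum, psum, ← Finset.sum_add_distrib]
  refine Finset.sum_congr rfl ?_
  intro z hz
  rw [mem_grid] at hz
  by_cases hzp : z = ((r.toNat, c.toNat) : ℕ × ℕ)
  · subst hzp
    have er : ((r.toNat : ℤ)) = r := Int.toNat_of_nonneg h1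
    have ec : ((c.toNat : ℤ)) = c := Int.toNat_of_nonneg h3
    have hl1 : LexLt ((r.toNat : ℤ)) ((c.toNat : ℤ)) r (c + 1) := by
      rw [er, ec]; right; exact ⟨rfl, by omega⟩
    have hl2 : ¬ LexLt ((r.toNat : ℤ)) ((c.toNat : ℤ)) r c := by
      rw [er, ec]; unfold LexLt; omega
    rw [if_pos rfl]
    by_cases hc : celln arr (r.toNat, c.toNat) = a
    · rw [if_pos ⟨hl1, hc⟩, if_neg (fun hh => hl2 hh.1), if_pos hc]
    · rw [if_neg (fun hh => hc hh.2), if_neg (fun hh => hc hh.2), if_neg hc]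
  · have hne : ¬(((z.1 : ℤ) = r) ∧ ((z.2 : ℤ) = c)) := by
      rintro ⟨e1, e2⟩
      exact hzp (Prod.ext (by omega) (by omega))
    have hiff : LexLt (z.1 : ℤ) (z.2 : ℤ) r (c + 1) ↔ LexLt (z.1 : ℤ) (z.2 : ℤ) r c := by
      unfold LexLt
      omega
    simp only [hiff, if_neg hzp, add_zero]

lemma bCell_inv (arr : List (List Int)) (N r c : Int)
    (st : PySem.Dict Int Int × PySem.Set (Int × Int))
    (hrc : Inb N r c) (h : BInv arr N r c st) :
    BInv arr N r (c + 1) (bCell arr N st r c) := by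
  obtain ⟨hD, hP, hnd⟩ := h
  obtain ⟨b1, b2, b3, b4⟩ := hrc
  constructor
  · -- counts
    intro a ha
    show (if cell arr r c ≠ 0 then st.1.insert (cell arr r c) (st.1.getD (cell arr r c) 0 + 1)
        else st.1).getD a 0 = _
    rw [psum_succ arr N r c a ⟨b1, b2, b3, b4⟩]
    by_cases hv : cell arr r c = 0
    · rw [if_neg (by simpa using hv)]
      rw [hD a ha, if_neg (by rw [hv]; exact fun e => ha e.symm)]
      push_cast
      ring
    · rw [if_pos hv, PySem.Dict.getD_insert]
      by_cases hav : a = cell arr r c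
      · rw [if_pos hav, hD (cell arr r c) hv, if_pos hav.symm]
        rw [← hav]
        push_cast
        ring
      · rw [if_neg hav, hD a ha, if_neg (fun e => hav e.symm)]
        push_cast
        ring
  · -- pairs
    intro p
    have hmem2 : p ∈ (bCell arr N st r c).2 ↔ p ∈ st.2 ∨ RdFrom arr N r c p := by
      show p ∈ (if r + 1 < N then bUpd (cell arr r c) (cell arr (r + 1) c)
          (if c + 1 < N then bUpd (cell arr r c) (cell arr r (c + 1)) st.2 else st.2)
        else (if c + 1 < N then bUpd (cell arr r c) (cell arr r (c + 1)) st.2 else st.2)) ↔ _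
      unfold RdFrom
      by_cases hr1 : r + 1 < N <;> by_cases hc1 : c + 1 < N
      · rw [if_pos hr1, if_pos hc1, mem_bUpd, mem_bUpd]; tauto
      · rw [if_pos hr1, if_neg hc1, mem_bUpd]; tauto
      · rw [if_neg hr1, if_pos hc1, mem_bUpd]; tauto
      · rw [if_neg hr1, if_neg hc1]; tauto
    rw [hmem2, hP p]
    constructor
    · rintro (⟨x, y, hinb, hlex, hrd⟩ | hrd)
      · exact ⟨x, y, hinb, by unfold LexLt at hlex ⊢; omega, hrd⟩
      · exact ⟨r, c, ⟨b1, b2, b3, b4⟩, by unfold LexLt; omega, hrd⟩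
    · rintro ⟨x, y, hinb, hlex, hrd⟩
      by_cases hxy : x = r ∧ y = c
      · right
        rw [hxy.1, hxy.2] at hrd
        exact hrd
      · left
        refine ⟨x, y, hinb, ?_, hrd⟩
        unfold LexLt at hlex ⊢
        rcases Decidable.not_and_iff_or_not.mp hxy with h | h <;> omega
  · -- nodup
    show (if r + 1 < N then bUpd (cell arr r c) (cell arr (r + 1) c)
        (if c + 1 < N then bUpd (cell arr r c) (cell arr r (c + 1)) st.2 else st.2)
      else (if c + 1 < N then bUpd (cell arr r c) (cell arr r (c + 1)) st.2 else st.2)).Nodup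
    by_cases hr1 : r + 1 < N <;> by_cases hc1 : c + 1 < N
    · rw [if_pos hr1, if_pos hc1]; exact nodup_bUpd _ _ _ (nodup_bUpd _ _ _ hnd)
    · rw [if_pos hr1, if_neg hc1]; exact nodup_bUpd _ _ _ hnd
    · rw [if_neg hr1, if_pos hc1]; exact nodup_bUpd _ _ _ hnd
    · rw [if_neg hr1, if_neg hc1]; exact hnd

lemma binv_row (arr : List (List Int)) (N r : Int) (st : PySem.Dict Int Int × PySem.Set (Int × Int))
    (h : BInv arr N r N st) : BInv arr N (r + 1) 0 st := by
  refine ⟨?_, ?_, h.pnd⟩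
  · intro a ha
    rw [h.cnt a ha]
    congr 1
    refine Finset.sum_congr rfl ?_
    intro z hz
    rw [mem_grid] at hz
    have hiff : LexLt (z.1 : Int) (z.2 : Int) r N ↔ LexLt (z.1 : Int) (z.2 : Int) (r + 1) 0 := by
      unfold LexLt; omega
    simp only [hiff]
  · intro p
    rw [h.pmem p]
    refine exists_congr fun x => exists_congr fun y => ?_
    constructor
    · rintro ⟨hinb, hlex, hrd⟩
      exact ⟨hinb, by obtain ⟨_, _, h3, h4⟩ := hinb; unfold LexLt at hlex ⊢; omega, hrd⟩
    · rintro ⟨hinb, hlex, hrd⟩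
      exact ⟨hinb, by obtain ⟨_, _, h3, h4⟩ := hinb; unfold LexLt at hlex ⊢; omega, hrd⟩

lemma binv_init (arr : List (List Int)) (N : Int) :
    BInv arr N 0 0 (PySem.Dict.empty, PySem.Set.empty) := by
  refine ⟨?_, ?_, List.nodup_nil⟩
  · intro a _
    rw [PySem.Dict.getD_empty]
    have : psum arr N 0 0 a = 0 := Finset.sum_eq_zero (fun z hz => by
      have h1 : ¬ LexLt (z.1 : Int) (z.2 : Int) 0 0 := by unfold LexLt; omega
      simp [h1])
    rw [this]
    rfl
  · intro p
    constructor
    · intro hp; cases hp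
    · rintro ⟨x, y, ⟨hx, _, hy, _⟩, hlex, _⟩
      exfalso
      unfold LexLt at hlex
      omega

-- B's right/down edges are exactly the 4-neighbor edges
lemma rd_iff_het (arr : List (List Int)) (N : Int) (p : Int × Int) :
    (∃ x y : Int, Inb N x y ∧ RdFrom arr N x y p) ↔ Het arr N p := by
  constructor
  · rintro ⟨x, y, hxy, hrd | hrd⟩
    · obtain ⟨hyN, h1, h2, h3, hp⟩ := hrd
      refine ⟨x, y, (0, 1), by simp [dirList], hxy, ?_, h1, ?_, ?_, ?_⟩ <;>
        simp only [add_zero, zero_add] at *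
      · obtain ⟨a1, a2, a3, a4⟩ := hxy; exact ⟨a1, a2, by omega, hyN⟩
      · exact h2
      · exact fun hh => h3 hh.symm
      · rw [hp, spair_min_max]
    · obtain ⟨hxN, h1, h2, h3, hp⟩ := hrd
      refine ⟨x, y, (1, 0), by simp [dirList], hxy, ?_, h1, ?_, ?_, ?_⟩ <;>
        simp only [add_zero, zero_add] at *
      · obtain ⟨a1, a2, a3, a4⟩ := hxy; exact ⟨by omega, hxN, a3, a4⟩
      · exact h2
      · exact fun hh => h3 hh.symm
      · rw [hp, spair_min_max]
  · rintro ⟨x, y, d, hd, hxy, hnb, h1, h2, h3, hp⟩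
    simp only [dirList, List.mem_cons, List.not_mem_nil, or_false] at hd
    rcases hd with hd | hd | hd | hd
    all_goals subst hd
    all_goals simp only [add_zero, zero_add] at hnb h2 h3 hp
    · -- d = (-1, 0): up neighbor; report as a down edge from (x - 1, y)
      have e2 : x + -1 = x - 1 := by ring
      rw [e2] at hnb h2 h3 hp
      refine ⟨x - 1, y, hnb, Or.inr ?_⟩
      have e : x - 1 + 1 = x := by ring
      rw [e]
      exact ⟨hxy.2.1, h2, h1, h3, by rw [hp, spair_min_max, min_comm, max_comm]⟩
    · -- d = (1, 0): down edge from (x, y)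
      refine ⟨x, y, hxy, Or.inr ?_⟩
      exact ⟨hnb.2.1, h1, h2, fun hh => h3 hh.symm, by rw [hp, spair_min_max]⟩
    · -- d = (0, -1): left neighbor; report as a right edge from (x, y - 1)
      have e2 : y + -1 = y - 1 := by ring
      rw [e2] at hnb h2 h3 hp
      refine ⟨x, y - 1, hnb, Or.inl ?_⟩
      have e : y - 1 + 1 = y := by ring
      rw [e]
      exact ⟨hxy.2.2.2, h2, h1, h3, by rw [hp, spair_min_max, min_comm, max_comm]⟩
    · -- d = (0, 1): right edge from (x, y)
      refine ⟨x, y, hxy, Or.inl ?_⟩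
      exact ⟨hnb.2.2.2, h1, h2, fun hh => h3 hh.symm, by rw [hp, spair_min_max]⟩

-- ---- assembly ----

lemma foldl_score (cs : PySem.Dict Int Int) (l : List (Int × Int)) (t : Int × Int → Int)
    (h : ∀ p ∈ l, cs.getD p.1 0 * cs.getD p.2 0 = t p) (init : Int) :
    l.foldl (fun score p => score + cs.getD p.1 0 * cs.getD p.2 0) init
      = init + (l.map t).sum := by
  induction l generalizing init with
  | nil => simp
  | cons p rest ih =>
    rw [List.foldl_cons, List.map_cons, List.sum_cons,
      ih (fun q hq => h q (List.mem_cons_of_mem p hq)) (init + cs.getD p.1 0 * cs.getD p.2 0),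
      h p List.mem_cons_self]
    ring

lemma main_eq (arr : List (List Int)) (N : Int) :
    calculate_score_with_bfs arr N = calculate_score_with_bfs_alt arr N := by
  by_cases hN : N ≤ 0
  · unfold calculate_score_with_bfs calculate_score_with_bfs_alt
    rw [PySem.List.pyRange_one_eq_nil hN]
    rfl
  · push Not at hN
    simp only [calculate_score_with_bfs, calculate_score_with_bfs_alt]
    set stA := (PySem.List.pyRange 0 N 1).foldl (fun st r =>
        (PySem.List.pyRange 0 N 1).foldl (fun st c => visitCell arr N st r c) st)
      ⟨List.replicate N.toNat (List.replicate N.toNat false), PySem.Dict.empty, PySem.Set.empty⟩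
      with hstA
    set stB := (PySem.List.pyRange 0 N 1).foldl (fun st r =>
        (PySem.List.pyRange 0 N 1).foldl (fun st c => bCell arr N st r c) st)
      ((PySem.Dict.empty : PySem.Dict Int Int), (PySem.Set.empty : PySem.Set (Int × Int)))
      with hstB
    have hA : OInv arr N N 0 stA := by
      rw [hstA]
      refine foldl_pyRange_inv _ (fun r st => OInv arr N r 0 st) 0 N (by omega) ?_ _
        (oinv_init arr N)
      intro r st hr0 hrN hI
      apply oinv_row
      exact foldl_pyRange_inv _ (fun c st => OInv arr N r c st) 0 N (by omega)
        (fun c st hc0 hcN hI => visitCell_inv arr N r c st ⟨hr0, hrN, hc0, hcN⟩ hI) st hI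
    have hB : BInv arr N N 0 stB := by
      rw [hstB]
      refine foldl_pyRange_inv _ (fun r st => BInv arr N r 0 st) 0 N (by omega) ?_ _
        (binv_init arr N)
      intro r st hr0 hrN hI
      apply binv_row
      exact foldl_pyRange_inv _ (fun c st => BInv arr N r c st) 0 N (by omega)
        (fun c st hc0 hcN hI => bCell_inv arr N r c st ⟨hr0, hrN, hc0, hcN⟩ hI) st hI
    have vtiff : ∀ x y : Int, Inb N x y →
        (vget stA.visited x y = true ↔ cell arr x y ≠ 0) := by
      intro x y hinb
      exact ⟨hA.good x y hinb, fun hc => hA.scanned x y hinb hc (Or.inl hinb.2.1)⟩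
    have csA : ∀ a : Int, a ≠ 0 → stA.cs.getD a 0 = (gcount arr N a : Int) := by
      intro a ha
      rw [hA.cs a ha]
      congr 1
      refine Finset.sum_congr rfl ?_
      intro z hz
      by_cases hcz : celln arr z = a
      · have hvz : vtn stA.visited z = true := by
          rw [← vget_natCast]
          exact (vtiff _ _ (inb_of_mem_grid N z hz)).mpr (by rw [← celln]; rw [hcz]; exact ha)
        simp [hvz, hcz]
      · simp [hcz]
    have pA : ∀ p : Int × Int, p ∈ stA.pairs ↔ Het arr N p := by
      intro p
      refine ⟨hA.psub p, ?_⟩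
      rintro ⟨x, y, d, hd, hxy, hnb, h1, h2, h3, hp⟩
      have hvt : vget stA.visited x y = true := (vtiff x y hxy).mpr h1
      rw [hp]
      exact hA.pfull x y hxy hvt d hd hnb h2 h3
    have csB : ∀ a : Int, a ≠ 0 → stB.1.getD a 0 = (gcount arr N a : Int) := by
      intro a ha
      rw [hB.cnt a ha]
      congr 1
      refine Finset.sum_congr rfl ?_
      intro z hz
      rw [mem_grid] at hz
      have hl : LexLt (z.1 : Int) (z.2 : Int) N 0 := Or.inl (by omega)
      simp [hl]
    have pB : ∀ p : Int × Int, p ∈ stB.2 ↔ Het arr N p := by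
      intro p
      rw [hB.pmem p, ← rd_iff_het arr N p]
      constructor
      · rintro ⟨x, y, hinb, _, hrd⟩
        exact ⟨x, y, hinb, hrd⟩
      · rintro ⟨x, y, hinb, hrd⟩
        exact ⟨x, y, hinb, Or.inl hinb.2.1, hrd⟩
    have hperm : stA.pairs.Perm stB.2 :=
      (List.perm_ext_iff_of_nodup hA.pnd hB.pnd).mpr
        (fun p => (pA p).trans (pB p).symm)
    rw [foldl_score stA.cs stA.pairs (fun p => (gcount arr N p.1 : Int) * (gcount arr N p.2 : Int))
        (fun p hp => by
          obtain ⟨hp1, hp2⟩ := het_ne_zero arr N p ((pA p).mp hp)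
          rw [csA p.1 hp1, csA p.2 hp2]) 0,
      foldl_score stB.1 stB.2 (fun p => (gcount arr N p.1 : Int) * (gcount arr N p.2 : Int))
        (fun p hp => by
          obtain ⟨hp1, hp2⟩ := het_ne_zero arr N p ((pB p).mp hp)
          rw [csB p.1 hp1, csB p.2 hp2]) 0]
    rw [(hperm.map _).sum_eq]

-- ===== VERDICT (by name: the statement is the Claim_ definition above) =====
theorem calculate_score_with_bfs_spec : Claim_equal_calculate_score_with_bfs := by
  intro arr N _ _
  unfold Spec_calculate_score_with_bfs
  exact main_eq arr N
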